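-- pv_equiv track=rewrite | github.com/Developernation/codefights | cfights/python3_solutions/matrixElmSum.py | matrixElementsSum
-- ===== SOURCE A (Python) =====
-- def matrixElementsSum(matrix):
--     out_list = []
--
--     for item in range(len(matrix)):
--         for num in range(len(matrix[item])):
--             try:
--                 if matrix[item].index(matrix[item][num],num) == matrix[item].index(0,num):
--                     if item+1 < len(matrix):
--                         matrix[item+1][num] = 0
--             except Exception:
--                 pass
--     for lst in matrix:
--         out_list += lst
--
--     return(sum(out_list))
-- ===== SOURCE B (Python) =====
-- def matrixElementsSum(matrix):
--     # Column-major scan: walk each column top to bottom with a 'dead' flag;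
--     # a zero kills the cell directly below it, but only while consecutive rows
--     # actually have that column (a short row breaks the chain).
--     total = 0
--     width = max((len(row) for row in matrix), default=0)
--     for j in range(width):
--         dead = False
--         for row in matrix:
--             if j < len(row):
--                 v = 0 if dead else row[j]
--                 total += v
--                 dead = (v == 0)
--             else:
--                 dead = False
--     return total
-- ===== Notes on version B (the rewrite author's own statement) =====
-- stated objective: alternative
-- what changed: A scans each row repeatedly with list.index and mutates the matrix to push zeroes into the next row before flattening and summing; B traverses the matrix column-major: for each column index it walks the rows once with a single 'dead' flag (reset when a short row lacks the column), accumulating the sum directly with no index scans and no mutation.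
import Mathlib
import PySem

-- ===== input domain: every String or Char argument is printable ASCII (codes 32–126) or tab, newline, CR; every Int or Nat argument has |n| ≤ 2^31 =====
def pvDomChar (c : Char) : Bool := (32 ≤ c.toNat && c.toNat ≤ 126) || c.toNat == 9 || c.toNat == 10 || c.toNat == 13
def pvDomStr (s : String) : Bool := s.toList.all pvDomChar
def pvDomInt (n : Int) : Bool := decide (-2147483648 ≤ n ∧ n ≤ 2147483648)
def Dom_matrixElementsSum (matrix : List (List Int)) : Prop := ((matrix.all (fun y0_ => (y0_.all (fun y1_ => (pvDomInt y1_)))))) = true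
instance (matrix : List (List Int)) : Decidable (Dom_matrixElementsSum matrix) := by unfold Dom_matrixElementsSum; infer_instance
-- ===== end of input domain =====

-- B replaces A's row-major .index-scan-and-mutate algorithm by a column-major scan: each
-- column is walked top to bottom once with a single 'dead' flag (alternative algorithm; the
-- inner .index scans disappear).
-- A mutates its argument in place (zeroes pushed downward); B does not: the equivalence proved
-- here is about the RETURN value only.


-- ===== PORT A =====
-- list.index(v, start) for the nonnegative in-range start A uses:
-- first position of v at index ≥ start; none = ValueError.
def pyIndexFrom (xs : List Int) (v : Int) (start : Nat) : Option Nat :=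
  (PySem.List.index? (xs.drop start) v).map (start + ·)

-- the body of A's inner loop (n = len(matrix), item/num the loop indices, m the matrix state)
def innerBody (n : Int) (item : Int) (m : List (List Int)) (num : Int) : List (List Int) :=
  let row := PySem.List.pyGetD m item []
  match PySem.List.pyGet? row num with
  | none => m                                       -- unreachable: num indexes row
  | some v =>
    match pyIndexFrom row v num.toNat, pyIndexFrom row 0 num.toNat with
    | some i1, some i2 =>
      if i1 = i2 then
        if item + 1 < n then
          match PySem.List.pySet? (PySem.List.pyGetD m (item + 1) []) num 0 with
          | some newRow => PySem.List.pySetD m (item + 1) newRow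
          | none => m                               -- IndexError swallowed by 'except: pass'
        else m
      else m
    | _, _ => m                                     -- ValueError swallowed by 'except: pass'

def matrixElementsSum (matrix : List (List Int)) : Int :=
  let m := (PySem.List.pyRange 0 (matrix.length : Int) 1).foldl (fun m item =>
    (PySem.List.pyRange 0 ((PySem.List.pyGetD m item []).length : Int) 1).foldl
      (innerBody (matrix.length : Int) item) m) matrix
  (m.foldl (fun acc lst => acc ++ lst) ([] : List Int)).sum

-- ===== PORT B =====
-- column-major: for each column index j < width, walk the rows once with a 'dead' flag;
-- 'j < len(row)' for the nonnegative j is exactly 'pyGet? row j = some x'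
def bstep (j : Int) (st : Int × Bool) (row : List Int) : Int × Bool :=
  match PySem.List.pyGet? row j with
  | some x =>
    let v : Int := if st.2 then 0 else x
    (st.1 + v, v == 0)
  | none => (st.1, false)

def matrixElementsSum_alt (matrix : List (List Int)) : Int :=
  let width : Nat := matrix.foldl (fun w row => max w row.length) 0
  (PySem.List.pyRange 0 (width : Int) 1).foldl (fun total j =>
    (matrix.foldl (bstep j) (total, false)).1) 0

-- ===== PRECONDITION & SPEC =====
def Spec_matrixElementsSum (matrix : List (List Int)) (out : Int) : Prop := out = matrixElementsSum_alt matrix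
instance (matrix : List (List Int)) (out : Int) : Decidable (Spec_matrixElementsSum matrix out) := by unfold Spec_matrixElementsSum; infer_instance

-- ===== CLAIM (what is proved, stated in full; the proofs are below) =====
def Claim_equal_matrixElementsSum : Prop := ∀ (matrix : List (List Int)), Dom_matrixElementsSum matrix → Spec_matrixElementsSum matrix (matrixElementsSum matrix)

-- ===== LEMMAS AND PROOFS =====

theorem innerBody_last (n item : Int) (hn : ¬ item + 1 < n) (m : List (List Int)) (num : Int) :
    innerBody n item m num = m := by
  unfold innerBody
  simp only [hn, if_false, ite_self]
  split <;> [rfl; (split <;> rfl)]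

theorem innerBody_char (n : Int) (t k : Nat) (m : List (List Int)) (R0 : List Int)
    (hrow : m.getD t [] = R0) (hk : k < R0.length) :
    innerBody n (t : Int) m (k : Int) =
      if R0.getD k 1 = 0 then
        (if (t : Int) + 1 < n then
          (if k < (m.getD (t + 1) []).length then
            m.set (t + 1) ((m.getD (t + 1) []).set k 0)
          else m)
        else m)
      else m := by
  have hdrop : R0.drop k = R0[k] :: R0.drop (k + 1) := List.drop_eq_getElem_cons hk
  have hcast : (t : Int) + 1 = ((t + 1 : Nat) : Int) := by omega
  unfold innerBody pyIndexFrom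
  simp only [PySem.List.pyGetD_natCast, hrow, Int.toNat_natCast, hdrop,
    PySem.List.pyGet?_natCast, List.getElem?_eq_getElem hk,
    List.getD_eq_getElem _ _ hk]
  rw [PySem.List.index?_cons_self]
  by_cases hz : R0[k] = 0
  · rw [hz, PySem.List.index?_cons_self]
    simp only [Option.map_some, Nat.add_zero]
    by_cases hcond : (t : Int) + 1 < n
    · rw [hcast] at hcond ⊢
      simp only [PySem.List.pyGetD_natCast, if_pos hcond]
      by_cases hb : k < (m.getD (t + 1) []).length
      · rw [PySem.List.pySet?_natCast _ k 0 hb]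
        simp only [PySem.List.pySetD_natCast, if_pos hb]
      · have hnone : PySem.List.pySet? (m.getD (t + 1) []) (k : Int) 0 = none := by
          rw [PySem.List.pySet?_eq_none_iff]
          simp only [PySem.Raise.InRange]
          omega
        rw [hnone, if_neg hb]
    · simp only [if_neg hcond]
  · rw [PySem.List.index?_cons_of_ne _ hz]
    rcases h0 : PySem.List.index? (R0.drop (k + 1)) 0 with _ | j
    · simp [hz]
    · simp only [Option.map_some]
      have hne : ¬ (k + 0 = k + (j + 1)) := by omega
      simp [hz]

def zk : List Int → List Int → List Int
  | _, [] => []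
  | [], y :: b => y :: b
  | x :: a, y :: b => (if x = 0 then 0 else y) :: zk a b

theorem zk_nil (b : List Int) : zk [] b = b := by cases b <;> rfl

theorem set_getD_self (m : List (List Int)) (j : Nat) :
    m.set j (m.getD j []) = m := by
  by_cases h : j < m.length
  · rw [List.getD_eq_getElem _ _ h]; exact List.set_getElem_self h
  · exact List.set_eq_of_length_le (by omega)

theorem inner_fold (n : Int) (t : Nat) (hn : (t : Int) + 1 < n) :
    ∀ (d k : Nat) (R0 : List Int), k + d = R0.length →
    ∀ (m : List (List Int)) (b : List Int),
      m.getD t [] = R0 → m.getD (t + 1) [] = b →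
      (PySem.List.pyRange (k : Int) (R0.length : Int) 1).foldl (innerBody n (t : Int)) m =
        m.set (t + 1) (b.take k ++ zk (R0.drop k) (b.drop k)) := by
  intro d
  induction d with
  | zero =>
    intro k R0 hkd m b hrow hb
    rw [PySem.List.pyRange_one_eq_nil (by omega)]
    have : R0.drop k = [] := by rw [List.drop_eq_nil_iff]; omega
    rw [this, zk_nil, List.foldl_nil, List.take_append_drop, ← hb, set_getD_self]
  | succ d ih =>
    intro k R0 hkd m b hrow hb
    have hk : k < R0.length := by omega
    rw [PySem.List.pyRange_one_cons (by omega)]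
    rw [List.foldl_cons]
    have hstep := innerBody_char n t k m R0 hrow hk
    have hcast : (k : Int) + 1 = ((k + 1 : Nat) : Int) := by omega
    rw [hb] at hstep
    rw [hcast, hstep]
    simp only [if_pos hn]
    have hzk : ∀ a : List Int, zk a [] = [] := by intro a; cases a <;> rfl
    have hdropR : R0.drop k = R0[k] :: R0.drop (k + 1) := List.drop_eq_getElem_cons hk
    by_cases hz : R0.getD k 1 = 0
    · simp only [if_pos hz]
      have hz' : R0[k] = 0 := by rwa [List.getD_eq_getElem _ _ hk] at hz
      by_cases hbl : k < b.length
      · simp only [if_pos hbl]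
        have hml : t + 1 < m.length := by
          by_contra hc
          have hnone : m[t + 1]? = none := List.getElem?_eq_none (by omega)
          have hbe : m.getD (t + 1) [] = [] := by
            rw [List.getD_eq_getElem?_getD, hnone]; rfl
          rw [hb] at hbe; subst hbe; simp at hbl
        have harg1 : (m.set (t + 1) (b.set k 0)).getD t [] = R0 := by
          rw [List.getD_eq_getElem?_getD, List.getElem?_set_ne (by omega : t + 1 ≠ t),
            ← List.getD_eq_getElem?_getD, hrow]
        have harg2 : (m.set (t + 1) (b.set k 0)).getD (t + 1) [] = b.set k 0 := by
          rw [List.getD_eq_getElem?_getD, List.getElem?_set_self hml]; rfl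
        rw [ih (k + 1) R0 (by omega) (m.set (t + 1) (b.set k 0)) (b.set k 0) harg1 harg2,
          List.set_set]
        congr 1
        have hdropb : b.drop k = b[k] :: b.drop (k + 1) := List.drop_eq_getElem_cons hbl
        have hset : b.set k 0 = b.take k ++ 0 :: b.drop (k + 1) := List.set_eq_take_cons_drop 0 hbl
        have hlt : (b.take k).length = k := by rw [List.length_take]; omega
        have h1 : (b.set k 0).take (k + 1) = b.take k ++ [0] := by
          have ht := List.take_length_add_append (l₁ := b.take k) (l₂ := 0 :: b.drop (k + 1)) 1
          rw [hlt] at ht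
          rw [hset, ht]; rfl
        have h2 : (b.set k 0).drop (k + 1) = b.drop (k + 1) := by
          have ht := List.drop_length_add_append (l₁ := b.take k) (l₂ := 0 :: b.drop (k + 1)) 1
          rw [hlt] at ht
          rw [hset, ht]; rfl
        rw [h1, h2, hdropR, hdropb]
        show b.take k ++ [0] ++ zk (R0.drop (k + 1)) (b.drop (k + 1)) =
          b.take k ++ (if R0[k] = 0 then 0 else b[k]) :: zk (R0.drop (k + 1)) (b.drop (k + 1))
        rw [if_pos hz', List.append_assoc]
        rfl
      · simp only [if_neg hbl]
        rw [ih (k + 1) R0 (by omega) m b hrow hb]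
        congr 1
        have h1 : b.take k = b := List.take_of_length_le (by omega)
        have h2 : b.take (k + 1) = b := List.take_of_length_le (by omega)
        have h3 : b.drop k = [] := by rw [List.drop_eq_nil_iff]; omega
        have h4 : b.drop (k + 1) = [] := by rw [List.drop_eq_nil_iff]; omega
        rw [h1, h2, h3, h4, hzk, hzk]
    · simp only [if_neg hz]
      rw [ih (k + 1) R0 (by omega) m b hrow hb]
      congr 1
      have hz' : R0[k] ≠ 0 := by rwa [List.getD_eq_getElem _ _ hk] at hz
      by_cases hbl : k < b.length
      · have hdropb : b.drop k = b[k] :: b.drop (k + 1) := List.drop_eq_getElem_cons hbl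
        rw [hdropR, hdropb]
        have hzc : zk (R0[k] :: R0.drop (k + 1)) (b[k] :: b.drop (k + 1)) =
            (if R0[k] = 0 then 0 else b[k]) :: zk (R0.drop (k + 1)) (b.drop (k + 1)) := rfl
        rw [hzc, if_neg hz', List.take_succ_eq_append_getElem hbl, List.append_assoc]
        rfl
      · have h1 : b.take k = b := List.take_of_length_le (by omega)
        have h2 : b.take (k + 1) = b := List.take_of_length_le (by omega)
        have h3 : b.drop k = [] := by rw [List.drop_eq_nil_iff]; omega
        have h4 : b.drop (k + 1) = [] := by rw [List.drop_eq_nil_iff]; omega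
        rw [h1, h2, h3, h4, hzk, hzk]

theorem foldl_const {α β : Type} (f : α → β → α) (h : ∀ a b, f a b = a) :
    ∀ (l : List β) (a : α), l.foldl f a = a := by
  intro l; induction l with
  | nil => intro a; rfl
  | cons x t ih => intro a; simp [List.foldl, h, ih]

def effList : List Int → List (List Int) → List (List Int)
  | _, [] => []
  | prev, r :: rest => zk prev r :: effList (zk prev r) rest

theorem set_append_cons (done rest : List (List Int)) (r v : List Int) :
    (done ++ r :: rest).set done.length v = done ++ v :: rest := by
  induction done with
  | nil => rfl
  | cons x d ih => simp [ih]

theorem outer_fold :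
    ∀ (pend done : List (List Int)) (prev : List Int) (n : Nat),
      done.getLast? = some prev → n = done.length + pend.length →
      (PySem.List.pyRange ((done.length : Int) - 1) (n : Int) 1).foldl
        (fun m item =>
          (PySem.List.pyRange 0 ((PySem.List.pyGetD m item []).length : Int) 1).foldl
            (innerBody (n : Int) item) m)
        (done ++ pend) = done ++ effList prev pend := by
  intro pend
  induction pend with
  | nil =>
    intro done prev n hlast hn
    have hne : done ≠ [] := by intro he; subst he; simp at hlast
    have hL : 1 ≤ done.length := by
      cases done with | nil => simp at hne | cons _ _ => simp
    have hn' : (n : Int) = ((done.length : Int) - 1) + 1 := by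
      simp at hn; omega
    rw [List.append_nil, hn', PySem.List.pyRange_one_singleton, List.foldl_cons, List.foldl_nil,
      foldl_const _ (fun a b => innerBody_last _ _ (by omega) a b)]
    simp [effList]
  | cons r rest ih =>
    intro done prev n hlast hn
    have hne : done ≠ [] := by intro he; subst he; simp at hlast
    have hL : 1 ≤ done.length := by
      cases done with | nil => simp at hne | cons _ _ => simp
    simp only [List.length_cons] at hn
    have hcast1 : (done.length : Int) - 1 = ((done.length - 1 : Nat) : Int) := by omega
    rw [PySem.List.pyRange_one_cons (by omega), List.foldl_cons]
    have hprev : (done ++ r :: rest).getD (done.length - 1) [] = prev := by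
      rw [List.getD_eq_getElem?_getD, List.getElem?_append_left (by omega),
        ← List.getLast?_eq_getElem?, hlast]
      rfl
    have hr : (done ++ r :: rest).getD (done.length - 1 + 1) [] = r := by
      have : done.length - 1 + 1 = done.length := by omega
      rw [this, List.getD_eq_getElem?_getD, List.getElem?_append_right (by omega)]
      simp
    have hbody :
        (PySem.List.pyRange 0
            ((PySem.List.pyGetD (done ++ r :: rest) ((done.length : Int) - 1) []).length : Int) 1).foldl
          (innerBody (n : Int) ((done.length : Int) - 1)) (done ++ r :: rest)
          = done ++ zk prev r :: rest := by
      rw [hcast1]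
      simp only [PySem.List.pyGetD_natCast, hprev]
      have hif := inner_fold (n : Int) (done.length - 1) (by omega) prev.length 0 prev
          (by omega) (done ++ r :: rest) r hprev hr
      simp only [Nat.cast_zero] at hif
      rw [hif]
      simp only [List.take_zero, List.drop_zero, List.nil_append]
      have hind : done.length - 1 + 1 = done.length := by omega
      rw [hind, set_append_cons]
    rw [hbody]
    have hstart : (done.length : Int) - 1 + 1 = ((done ++ [zk prev r]).length : Int) - 1 := by
      simp
    have happ : done ++ zk prev r :: rest = (done ++ [zk prev r]) ++ rest := by
      simp
    rw [hstart, happ, ih (done ++ [zk prev r]) (zk prev r) n List.getLast?_concat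
      (by simp only [List.length_append, List.length_cons, List.length_nil]; omega)]
    simp [effList]

theorem A_eq (matrix : List (List Int)) :
    matrixElementsSum matrix = (effList [] matrix).flatten.sum := by
  unfold matrixElementsSum
  cases matrix with
  | nil => rfl
  | cons r rest =>
    have hout := outer_fold rest [r] r ((r :: rest).length) rfl (by simp; omega)
    simp only [List.length_cons, List.length_nil, Nat.zero_add] at hout ⊢
    have h0 : ((0 + 1 : Nat) : Int) - 1 = 0 := by norm_num
    rw [h0] at hout
    rw [List.singleton_append] at hout
    rw [hout, PySem.List.foldl_append_eq_flatten, List.nil_append]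
    have : effList [] (r :: rest) = r :: effList r rest := by
      show zk [] r :: effList (zk [] r) rest = _
      rw [zk_nil]
    rw [this]
    rfl

-- ===== B-side lemmas (column-major scan = column sums of the effective matrix) =====

theorem zk_length : ∀ (a b : List Int), (zk a b).length = b.length := by
  intro a b
  induction b generalizing a with
  | nil => cases a <;> rfl
  | cons y t ih => cases a with
    | nil => rfl
    | cons x s => simp [zk, ih]

theorem zk_getElem? : ∀ (a b : List Int) (j : Nat),
    (zk a b)[j]? = b[j]?.map (fun y => if a[j]? = some 0 then 0 else y) := by
  intro a b
  induction b generalizing a with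
  | nil => intro j; cases a <;> simp [zk]
  | cons y t ih =>
    intro j
    cases a with
    | nil =>
      rw [zk_nil]
      cases h : (y :: t)[j]? <;> simp
    | cons x s =>
      cases j with
      | zero =>
        show (zk (x :: s) (y :: t))[0]? = _
        simp only [zk, List.getElem?_cons_zero, Option.map_some]
        congr 1
        by_cases hx : x = 0 <;> simp [hx]
      | succ j =>
        show (zk (x :: s) (y :: t))[j + 1]? = _
        simp only [zk, List.getElem?_cons_succ]
        exact ih s j

-- one column step: the inner fold, started with dead = «prev[j] is an (effective) zero»,
-- adds the j-th entry of every effective row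
theorem colScan (j : Nat) : ∀ (rows : List (List Int)) (prev : List Int) (tot : Int),
    (rows.foldl (bstep (j : Int)) (tot, decide (prev[j]? = some 0))).1
    = tot + ((effList prev rows).map (fun r => r[j]?.getD 0)).sum := by
  intro rows
  induction rows with
  | nil => intro prev tot; simp [effList]
  | cons r rest ih =>
    intro prev tot
    rw [List.foldl_cons]
    have hget : PySem.List.pyGet? r (j : Int) = r[j]? := PySem.List.pyGet?_natCast r j
    have heff : effList prev (r :: rest) = zk prev r :: effList (zk prev r) rest := rfl
    rw [heff, List.map_cons, List.sum_cons]
    cases hrj : r[j]? with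
    | none =>
      have hzj : (zk prev r)[j]? = none := by rw [zk_getElem?, hrj]; rfl
      have hs : bstep (j : Int) (tot, decide (prev[j]? = some 0)) r
          = (tot, decide ((zk prev r)[j]? = some 0)) := by
        unfold bstep; rw [hget, hrj]; simp [hzj]
      rw [hs, ih (zk prev r) tot, hzj]
      simp only [Option.getD_none]
      ring
    | some x =>
      have hzj : (zk prev r)[j]? = some (if prev[j]? = some 0 then 0 else x) := by
        rw [zk_getElem?, hrj]; rfl
      have hs : bstep (j : Int) (tot, decide (prev[j]? = some 0)) r
          = (tot + (if prev[j]? = some 0 then 0 else x), decide ((zk prev r)[j]? = some 0)) := by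
        unfold bstep
        rw [hget, hrj]
        by_cases h : prev[j]? = some 0 <;> by_cases hx : x = 0 <;> simp [h, hx, hzj]
      rw [hs, ih (zk prev r) _, hzj]
      simp only [Option.getD_some]
      ring

-- summing a row's entries over all column indices up to any bound ≥ its length gives its sum
theorem rowSumTrunc : ∀ (r : List Int) (w : Nat), r.length ≤ w →
    ((List.range w).map (fun j => r[j]?.getD 0)).sum = r.sum := by
  intro r
  induction r with
  | nil =>
    intro w _
    have h : ((List.range w).map (fun j => (([] : List Int))[j]?.getD 0)) =
        (List.range w).map (fun _ => (0 : Int)) := by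
      apply List.map_congr_left; intro j _; simp
    rw [h]
    simp
  | cons x t ih =>
    intro w hw
    cases w with
    | zero => simp at hw
    | succ w =>
      rw [List.range_succ_eq_map, List.map_cons, List.map_map, List.sum_cons]
      have h : ((List.range w).map ((fun j => (x :: t)[j]?.getD 0) ∘ (· + 1))) =
          (List.range w).map (fun j => t[j]?.getD 0) := by
        apply List.map_congr_left; intro j _; simp
      rw [h, ih w (by simpa using hw)]
      simp

-- exchange the two summations: per-column sums over rows = per-row sums over columns
theorem sumSwap : ∀ (E : List (List Int)) (w : Nat),
    ((List.range w).map (fun j => (E.map (fun r => r[j]?.getD 0)).sum)).sum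
    = (E.map (fun r => ((List.range w).map (fun j => r[j]?.getD 0)).sum)).sum := by
  intro E
  induction E with
  | nil => intro w; simp
  | cons r rest ih =>
    intro w
    simp only [List.map_cons, List.sum_cons]
    rw [← ih w, ← List.sum_map_add]

theorem foldl_max_init : ∀ (rows : List (List Int)) (a : Nat),
    a ≤ rows.foldl (fun w row => max w row.length) a := by
  intro rows
  induction rows with
  | nil => intro a; simp
  | cons x t ih => intro a; exact le_trans (le_max_left _ _) (ih (max a x.length))

theorem width_le : ∀ (rows : List (List Int)) (a : Nat) (r : List Int), r ∈ rows →
    r.length ≤ rows.foldl (fun w row => max w row.length) a := by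
  intro rows
  induction rows with
  | nil => intro a r h; simp at h
  | cons x t ih =>
    intro a r h
    rcases List.mem_cons.mp h with h | h
    · subst h
      exact le_trans (le_max_right _ _) (foldl_max_init t _)
    · exact ih (max a x.length) r h

theorem effList_lengths : ∀ (rows : List (List Int)) (prev : List Int),
    (effList prev rows).map List.length = rows.map List.length := by
  intro rows
  induction rows with
  | nil => intro prev; rfl
  | cons r t ih =>
    intro prev
    show (zk prev r).length :: (effList (zk prev r) t).map List.length = _
    rw [zk_length, ih]
    rfl

-- B's port computes the flattened sum of the effective matrix
theorem B_eq (matrix : List (List Int)) :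
    matrixElementsSum_alt matrix = (effList [] matrix).flatten.sum := by
  unfold matrixElementsSum_alt
  -- the outer fold over columns accumulates the per-column sums
  have hcols : ∀ (d k : Nat) (tot : Int),
      k + d = matrix.foldl (fun w row => max w row.length) 0 →
      (PySem.List.pyRange (k : Int) ((matrix.foldl (fun w row => max w row.length) 0 : Nat) : Int) 1).foldl
        (fun total j => (matrix.foldl (bstep j) (total, false)).1) tot
      = tot + (((List.range (matrix.foldl (fun w row => max w row.length) 0)).drop k).map
          (fun j => ((effList [] matrix).map (fun r => r[j]?.getD 0)).sum)).sum := by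
    intro d
    induction d with
    | zero =>
      intro k tot hk
      rw [PySem.List.pyRange_one_eq_nil (by omega), List.foldl_nil,
        List.drop_eq_nil_iff.mpr (by simp; omega)]
      simp
    | succ d ihd =>
      intro k tot hk
      rw [PySem.List.pyRange_one_cons (by omega)]
      simp only [List.foldl_cons]
      have hstep := colScan k matrix [] tot
      rw [show decide ((([] : List Int))[k]? = some 0) = false from by simp] at hstep
      have hcast : (k : Int) + 1 = ((k + 1 : Nat) : Int) := by omega
      rw [hstep, hcast, ihd (k + 1) _ (by omega)]
      have hdropk : (List.range (matrix.foldl (fun w row => max w row.length) 0)).drop k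
          = k :: (List.range (matrix.foldl (fun w row => max w row.length) 0)).drop (k + 1) := by
        rw [List.drop_eq_getElem_cons (by simp; omega)]
        simp
      rw [hdropk, List.map_cons, List.sum_cons]
      ring
  have h0 := hcols (matrix.foldl (fun w row => max w row.length) 0) 0 0 (by omega)
  simp only [Nat.cast_zero, List.drop_zero, zero_add] at h0
  rw [h0, sumSwap]
  have hrows : ((effList [] matrix).map (fun r =>
        ((List.range (matrix.foldl (fun w row => max w row.length) 0)).map
          (fun j => r[j]?.getD 0)).sum))
      = (effList [] matrix).map List.sum := by
    apply List.map_congr_left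
    intro r hr
    apply rowSumTrunc
    have hmem : r.length ∈ matrix.map List.length := by
      rw [← effList_lengths matrix []]
      exact List.mem_map_of_mem hr
    rcases List.mem_map.mp hmem with ⟨r0, hr0, hlen⟩
    rw [← hlen]
    exact width_le matrix 0 r0 hr0
  rw [hrows, List.sum_flatten]

-- ===== VERDICT (by name: the statement is the Claim_ definition above) =====
theorem matrixElementsSum_spec : Claim_equal_matrixElementsSum := by
  intro matrix _
  unfold Spec_matrixElementsSum
  rw [A_eq, B_eq]
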